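-- pv_equiv track=rewrite | github.com/kirisuoc/AdventOfCode2024 | Day5/aoc5-1.py | sum_of_middles
-- ===== SOURCE A (Python) =====
-- def parse_relations(relations):
-- 	'''
-- 	Convierte la lista de relaciones en un diccionario donde
-- 	cada número apunta a los números que deben ir después de él.
-- 	'''
-- 	relation_dict = {}
-- 	for a, b in relations:
-- 		if a not in relation_dict:
-- 			relation_dict[a] = set()
-- 		relation_dict[a].add(b)
-- 	return relation_dict
--
-- def is_valid_list(numbers, relation_dict):
-- 	'''
-- 	Verifica si la lista de números respeta las relaciones dadas.
-- 	'''
-- 	seen = set()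
-- 	for num in numbers:
-- 		if num in relation_dict:
-- 			if any(after in seen for after in relation_dict[num]):
-- 				return False
-- 		seen.add(num)
-- 	return True
--
-- def sum_of_middles(relations, number_lists):
--     """
--     Calcula la suma de los números centrales de todas las listas válidas.
--     """
--     relation_dict = parse_relations(relations)
--     middle_sum = 0
--
--     for number_list in number_lists:
--         if is_valid_list(number_list, relation_dict):
--             # Encontrar el número en el medio de la lista
--             mid_index = len(number_list) // 2  # Índice del número en el medio
--             middle_sum += number_list[mid_index]  # Sumar el número en el medio
--
--     return middle_sum
-- ===== SOURCE B (Python) =====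
-- def sum_of_middles(relations, number_lists):
--     rel = set(relations)
--     total = 0
--     for nums in number_lists:
--         ok = True
--         prev = []
--         for x in nums:
--             for y in prev:
--                 if (x, y) in rel:
--                     ok = False
--             prev.append(x)
--         if ok:
--             total += nums[len(nums) // 2]
--     return total
-- ===== Notes on version B (the rewrite author's own statement) =====
-- stated objective: alternative
-- what changed: Replaces the successor-dictionary plus seen-set single pass per list with a direct nested pairwise scan that tests each (later, earlier) pair for membership in the relation set itself, so the dictionary of successor sets disappears entirely.
import Mathlib
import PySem

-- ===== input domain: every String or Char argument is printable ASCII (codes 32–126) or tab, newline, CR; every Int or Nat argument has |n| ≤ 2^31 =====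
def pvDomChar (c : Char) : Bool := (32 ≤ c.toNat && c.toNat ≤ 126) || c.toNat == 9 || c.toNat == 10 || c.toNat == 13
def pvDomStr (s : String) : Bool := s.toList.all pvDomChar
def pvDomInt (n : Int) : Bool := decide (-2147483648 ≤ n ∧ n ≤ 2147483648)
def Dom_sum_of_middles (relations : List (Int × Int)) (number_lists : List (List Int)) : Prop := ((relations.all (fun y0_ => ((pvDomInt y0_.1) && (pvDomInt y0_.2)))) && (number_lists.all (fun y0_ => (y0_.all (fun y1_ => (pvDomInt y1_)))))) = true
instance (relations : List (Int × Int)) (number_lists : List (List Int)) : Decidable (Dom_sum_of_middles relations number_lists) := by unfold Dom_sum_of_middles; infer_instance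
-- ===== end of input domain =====

-- B drops A's successor-set dictionary: it tests each (later, earlier) element pair directly
-- against the set of relation pairs (objective: alternative decomposition, same result).


-- ===== PORT A =====
def parse_relations_port (relations : List (Int × Int)) : PySem.Dict Int (PySem.Set Int) :=
  relations.foldl (fun d ab =>
    let d1 := if d.contains ab.1 then d else d.insert ab.1 PySem.Set.empty
    d1.insert ab.1 (PySem.Set.add (d1.getD ab.1 PySem.Set.empty) ab.2)) PySem.Dict.empty

def is_valid_list_port (pr : PySem.Dict Int (PySem.Set Int)) : List Int → PySem.Set Int → Bool
  | [], _ => true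
  | num :: rest, seen =>
    if pr.contains num then
      if (pr.getD num PySem.Set.empty).any (fun after => seen.contains after) then false
      else is_valid_list_port pr rest (PySem.Set.add seen num)
    else is_valid_list_port pr rest (PySem.Set.add seen num)

def sum_of_middles (relations : List (Int × Int)) (number_lists : List (List Int)) : Int :=
  let pr := parse_relations_port relations
  number_lists.foldl (fun acc nl =>
    if is_valid_list_port pr nl PySem.Set.empty then
      acc + PySem.List.pyGetD nl (PySem.Int.floordiv (nl.length : Int) 2) 0
    else acc) 0

-- ===== PORT B =====
def sum_of_middles_alt (relations : List (Int × Int)) (number_lists : List (List Int)) : Int :=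
  let rel := PySem.Set.ofList relations
  number_lists.foldl (fun total nums =>
    let st := nums.foldl (fun (st : Bool × List Int) x =>
      (st.2.foldl (fun o y => if PySem.Set.contains rel (x, y) then false else o) st.1,
       st.2 ++ [x])) (true, ([] : List Int))
    if st.1 then total + PySem.List.pyGetD nums (PySem.Int.floordiv (nums.length : Int) 2) 0
    else total) 0

-- ===== PRECONDITION & SPEC =====
-- Pre_ excludes inputs whose number_lists contains an empty list: there A (and B alike) raise
-- IndexError on the middle-element access nums[len(nums)//2].
def Pre_sum_of_middles (relations : List (Int × Int)) (number_lists : List (List Int)) : Prop :=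
  ∀ nl ∈ number_lists, nl ≠ []
instance (relations : List (Int × Int)) (number_lists : List (List Int)) : Decidable (Pre_sum_of_middles relations number_lists) := by unfold Pre_sum_of_middles; infer_instance

def pvWitness_sum_of_middles : (List (Int × Int)) × List (List Int) :=
  ([(1, 2), (2, 3)], [[1, 2, 3], [3, 2, 1]])

def Spec_sum_of_middles (relations : List (Int × Int)) (number_lists : List (List Int)) (out : Int) : Prop := out = sum_of_middles_alt relations number_lists
instance (relations : List (Int × Int)) (number_lists : List (List Int)) (out : Int) : Decidable (Spec_sum_of_middles relations number_lists out) := by unfold Spec_sum_of_middles; infer_instance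

-- ===== CLAIM (what is proved, stated in full; the proofs are below) =====
def Claim_equal_sum_of_middles : Prop := ∀ (relations : List (Int × Int)) (number_lists : List (List Int)), Dom_sum_of_middles relations number_lists → Pre_sum_of_middles relations number_lists → Spec_sum_of_middles relations number_lists (sum_of_middles relations number_lists)

-- ===== LEMMAS AND PROOFS =====

-- one parse step only changes the entry at key ab.1, adding ab.2 to its set
lemma parse_step_getD (d : PySem.Dict Int (PySem.Set Int)) (a b x : Int) :
    ((let d1 := if d.contains a then d else d.insert a PySem.Set.empty
      d1.insert a (PySem.Set.add (d1.getD a PySem.Set.empty) b)).getD x PySem.Set.empty)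
    = if x = a then PySem.Set.add (d.getD a PySem.Set.empty) b
      else d.getD x PySem.Set.empty := by
  by_cases hc : d.contains a = true
  · simp [hc, PySem.Dict.getD_insert]
  · have hc' : d.contains a = false := by simpa using hc
    have h0 : d.getD a PySem.Set.empty = PySem.Set.empty :=
      PySem.Dict.getD_of_not_contains d _ hc'
    simp only [PySem.Dict.getD_insert]
    split_ifs with h
    · rw [PySem.Dict.getD_insert_self, h0]
    · exact PySem.Dict.getD_insert_of_ne d _ _ h

-- membership in the parsed dictionary's set at x is exactly pair membership in relations
lemma mem_parse (relations : List (Int × Int)) (x y : Int) :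
    (y ∈ (parse_relations_port relations).getD x PySem.Set.empty) ↔ (x, y) ∈ relations := by
  unfold parse_relations_port
  suffices h : ∀ (d : PySem.Dict Int (PySem.Set Int)),
      (y ∈ (relations.foldl (fun d ab =>
        let d1 := if d.contains ab.1 then d else d.insert ab.1 PySem.Set.empty
        d1.insert ab.1 (PySem.Set.add (d1.getD ab.1 PySem.Set.empty) ab.2)) d).getD x PySem.Set.empty)
      ↔ (y ∈ d.getD x PySem.Set.empty ∨ (x, y) ∈ relations) by
    simpa [PySem.Dict.getD_empty, PySem.Set.empty] using h PySem.Dict.empty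
  induction relations with
  | nil => intro d; simp
  | cons ab rest ih =>
    obtain ⟨a, b⟩ := ab
    intro d
    rw [List.foldl_cons, ih, parse_step_getD d a b x]
    by_cases hx : x = a
    · subst hx
      rw [if_pos rfl]
      simp only [PySem.Set.mem_add, List.mem_cons, Prod.mk.injEq, true_and]
      tauto
    · rw [if_neg hx]
      simp only [List.mem_cons, Prod.mk.injEq]
      constructor
      · tauto
      · rintro (h | ⟨h1, h2⟩ | h) <;> [exact Or.inl h; exact absurd h1 hx; exact Or.inr h]

-- B's inner loop over prev is 'ok && no bad pair'
lemma inner_fold_eq (rel : PySem.Set (Int × Int)) (x : Int) (prev : List Int) (ok : Bool) :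
    prev.foldl (fun o y => if PySem.Set.contains rel (x, y) then false else o) ok
    = (ok && !prev.any (fun y => PySem.Set.contains rel (x, y))) :=
  PySem.List.foldl_if_false_eq _ _ _

-- once ok is false, B's per-list fold stays false
lemma fold_false (rel : PySem.Set (Int × Int)) (nums : List Int) (prev : List Int) :
    (nums.foldl (fun (st : Bool × List Int) x =>
      (st.2.foldl (fun o y => if PySem.Set.contains rel (x, y) then false else o) st.1,
       st.2 ++ [x])) (false, prev)).1 = false := by
  induction nums generalizing prev with
  | nil => rfl
  | cons x rest ih =>
    rw [List.foldl_cons, inner_fold_eq]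
    simpa using ih (prev ++ [x])

-- A's per-element test against 'seen' equals B's pair test against the prefix
lemma bad_eq (relations : List (Int × Int)) (num : Int)
    (seen : PySem.Set Int) (prev : List Int) (hmem : ∀ y, y ∈ seen ↔ y ∈ prev) :
    ((parse_relations_port relations).getD num PySem.Set.empty).any
      (fun after => seen.contains after)
    = prev.any (fun y => PySem.Set.contains (PySem.Set.ofList relations) (num, y)) := by
  rcases Bool.eq_false_or_eq_true
      (prev.any (fun y => PySem.Set.contains (PySem.Set.ofList relations) (num, y))) with hb | hb <;>
    rw [hb]
  · simp only [List.any_eq_true, PySem.Set.contains_iff, PySem.Set.mem_ofList] at hb ⊢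
    obtain ⟨y, hy, hrel⟩ := hb
    exact ⟨y, (mem_parse relations num y).mpr hrel, (hmem y).mpr hy⟩
  · simp only [List.any_eq_false, PySem.Set.contains_iff, PySem.Set.mem_ofList] at hb ⊢
    intro a ha hsa
    exact hb a ((hmem a).mp hsa) ((mem_parse relations num a).mp ha)

-- A's seen-set pass equals B's prefix-list pairwise fold
lemma valid_eq (relations : List (Int × Int)) (nums : List Int)
    (seen : PySem.Set Int) (prev : List Int) (hmem : ∀ y, y ∈ seen ↔ y ∈ prev) :
    is_valid_list_port (parse_relations_port relations) nums seen
    = (nums.foldl (fun (st : Bool × List Int) x =>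
        (st.2.foldl (fun o y => if PySem.Set.contains (PySem.Set.ofList relations) (x, y) then false else o) st.1,
         st.2 ++ [x])) (true, prev)).1 := by
  induction nums generalizing seen prev with
  | nil => rfl
  | cons num rest ih =>
    have hbad := bad_eq relations num seen prev hmem
    have hmem' : ∀ y, y ∈ PySem.Set.add seen num ↔ y ∈ prev ++ [num] := by
      intro y; simp [PySem.Set.mem_add, hmem y]
    rw [List.foldl_cons, inner_fold_eq]
    by_cases hcon : (parse_relations_port relations).contains num = true
    · unfold is_valid_list_port
      rw [if_pos hcon, hbad]
      by_cases hb :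
          prev.any (fun y => PySem.Set.contains (PySem.Set.ofList relations) (num, y)) = true
      · rw [hb]; simpa using (fold_false _ rest (prev ++ [num])).symm
      · rw [Bool.not_eq_true] at hb
        rw [hb]
        simpa using ih (PySem.Set.add seen num) (prev ++ [num]) hmem'
    · -- absent key: A skips the test; its successor set is empty, so no pair can be bad
      have hcon' : (parse_relations_port relations).contains num = false := by simpa using hcon
      have h0 : (parse_relations_port relations).getD num PySem.Set.empty = PySem.Set.empty :=
        PySem.Dict.getD_of_not_contains _ _ hcon'
      have hb : prev.any (fun y => PySem.Set.contains (PySem.Set.ofList relations) (num, y))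
          = false := by
        rw [← hbad, h0]; rfl
      unfold is_valid_list_port
      rw [if_neg hcon, hb]
      simpa using ih (PySem.Set.add seen num) (prev ++ [num]) hmem'

-- ===== VERDICT (by name: the statement is the Claim_ definition above) =====
theorem sum_of_middles_spec : Claim_equal_sum_of_middles := by
  intro relations number_lists _ _
  unfold Spec_sum_of_middles sum_of_middles sum_of_middles_alt
  apply PySem.List.foldl_congr_mem
  intro acc nl _
  rw [valid_eq relations nl PySem.Set.empty [] (by intro y; simp [PySem.Set.empty])]
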